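-- pv_equiv track=rewrite | github.com/woctezuma/steam-market | src/market_gamble_utils.py | enumerate_item_rarity_patterns
-- ===== SOURCE A (Python) =====
-- def enumerate_item_rarity_patterns(
--     listing_hashes_per_app_id_for_common: dict[str, int],
--     listing_hashes_per_app_id_for_uncommon: dict[str, int],
--     listing_hashes_per_app_id_for_rare: dict[str, int],
-- ) -> dict[str, dict]:
--     all_app_ids = set(listing_hashes_per_app_id_for_common)
--     all_app_ids = all_app_ids.union(listing_hashes_per_app_id_for_uncommon)
--     all_app_ids = all_app_ids.union(listing_hashes_per_app_id_for_rare)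
--
--     item_rarity_patterns_per_app_id: dict[str, dict] = {}
--
--     for app_id in all_app_ids:
--         item_rarity_patterns_per_app_id[app_id] = {}
--
--         try:
--             num_common = listing_hashes_per_app_id_for_common[app_id]
--         except KeyError:
--             num_common = None
--
--         try:
--             num_uncommon = listing_hashes_per_app_id_for_uncommon[app_id]
--         except KeyError:
--             num_uncommon = None
--
--         try:
--             num_rare = listing_hashes_per_app_id_for_rare[app_id]
--         except KeyError:
--             num_rare = None
--
--         item_rarity_patterns_per_app_id[app_id]["common"] = num_common
--         item_rarity_patterns_per_app_id[app_id]["uncommon"] = num_uncommon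
--         item_rarity_patterns_per_app_id[app_id]["rare"] = num_rare
--
--     return item_rarity_patterns_per_app_id
-- ===== SOURCE B (Python) =====
-- def enumerate_item_rarity_patterns(
--     listing_hashes_per_app_id_for_common: dict[str, int],
--     listing_hashes_per_app_id_for_uncommon: dict[str, int],
--     listing_hashes_per_app_id_for_rare: dict[str, int],
-- ) -> dict[str, dict]:
--     # Scatter pass: visit each source dict once and write into the merged entry,
--     # instead of building a key-union and doing three lookups per key.
--     item_rarity_patterns_per_app_id: dict[str, dict] = {}
--
--     for label, source in (
--         ("common", listing_hashes_per_app_id_for_common),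
--         ("uncommon", listing_hashes_per_app_id_for_uncommon),
--         ("rare", listing_hashes_per_app_id_for_rare),
--     ):
--         for app_id, value in source.items():
--             entry = item_rarity_patterns_per_app_id.setdefault(
--                 app_id, {"common": None, "uncommon": None, "rare": None}
--             )
--             entry[label] = value
--
--     return item_rarity_patterns_per_app_id
-- ===== Notes on version B (the rewrite author's own statement) =====
-- stated objective: alternative
-- what changed: Replaces A's gather pass (build the key-union set, then three dict lookups per key) with a scatter pass: iterate each of the three source dicts once, seeding the merged entry via setdefault and writing the one rarity value into it.
import Mathlib
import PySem

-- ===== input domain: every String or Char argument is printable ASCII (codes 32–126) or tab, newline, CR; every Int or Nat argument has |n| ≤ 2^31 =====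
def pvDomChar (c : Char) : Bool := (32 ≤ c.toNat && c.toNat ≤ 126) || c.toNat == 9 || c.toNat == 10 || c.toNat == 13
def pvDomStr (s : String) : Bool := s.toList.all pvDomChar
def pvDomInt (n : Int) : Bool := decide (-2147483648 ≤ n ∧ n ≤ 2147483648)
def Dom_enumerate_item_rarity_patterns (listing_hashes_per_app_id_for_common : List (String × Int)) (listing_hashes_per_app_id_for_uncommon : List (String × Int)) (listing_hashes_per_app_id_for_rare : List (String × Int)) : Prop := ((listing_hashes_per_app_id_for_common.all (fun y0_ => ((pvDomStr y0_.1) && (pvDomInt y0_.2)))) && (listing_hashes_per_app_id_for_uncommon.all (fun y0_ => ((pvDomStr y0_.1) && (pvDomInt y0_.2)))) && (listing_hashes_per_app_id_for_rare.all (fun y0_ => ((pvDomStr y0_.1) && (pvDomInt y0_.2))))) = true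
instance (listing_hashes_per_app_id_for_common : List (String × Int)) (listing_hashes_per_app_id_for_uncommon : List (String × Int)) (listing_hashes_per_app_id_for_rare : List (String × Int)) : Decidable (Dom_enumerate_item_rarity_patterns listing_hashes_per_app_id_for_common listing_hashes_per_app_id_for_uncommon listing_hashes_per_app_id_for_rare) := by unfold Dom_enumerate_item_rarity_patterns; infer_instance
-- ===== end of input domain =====

-- ===== PORT A =====
-- B merges the three dicts by a scatter pass over each source instead of A's gather over the key-union (alternative decomposition, same cost).
def enumerate_item_rarity_patterns (listing_hashes_per_app_id_for_common : List (String × Int)) (listing_hashes_per_app_id_for_uncommon : List (String × Int)) (listing_hashes_per_app_id_for_rare : List (String × Int)) : List (String × List (String × Option Int)) :=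
  let all_app_ids : PySem.Set String :=
    PySem.Set.union
      (PySem.Set.union (PySem.Set.ofList (listing_hashes_per_app_id_for_common.map Prod.fst))
        (listing_hashes_per_app_id_for_uncommon.map Prod.fst))
      (listing_hashes_per_app_id_for_rare.map Prod.fst)
  let item_rarity_patterns_per_app_id : PySem.Dict String (PySem.Dict String (Option Int)) :=
    all_app_ids.foldl
      (fun acc app_id =>
        -- try/except KeyError → Option via Dict.get?
        let num_common := (PySem.Dict.mk listing_hashes_per_app_id_for_common).get? app_id
        let num_uncommon := (PySem.Dict.mk listing_hashes_per_app_id_for_uncommon).get? app_id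
        let num_rare := (PySem.Dict.mk listing_hashes_per_app_id_for_rare).get? app_id
        acc.insert app_id
          (((PySem.Dict.empty.insert "common" num_common).insert "uncommon" num_uncommon).insert
            "rare" num_rare))
      PySem.Dict.empty
  item_rarity_patterns_per_app_id.items.map (fun p => (p.1, p.2.items))

-- ===== PORT B =====
def pvSeedEntry : PySem.Dict String (Option Int) :=
  PySem.Dict.ofList [("common", none), ("uncommon", none), ("rare", none)]

-- one scatter pass: 'entry = result.setdefault(app_id, seed); entry[label] = value'
def pvScatterPass (acc : PySem.Dict String (PySem.Dict String (Option Int))) (label : String) (source : List (String × Int)) : PySem.Dict String (PySem.Dict String (Option Int)) :=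
  source.foldl (fun acc p => acc.insert p.1 ((acc.getD p.1 pvSeedEntry).insert label (some p.2))) acc

def enumerate_item_rarity_patterns_alt (listing_hashes_per_app_id_for_common : List (String × Int)) (listing_hashes_per_app_id_for_uncommon : List (String × Int)) (listing_hashes_per_app_id_for_rare : List (String × Int)) : List (String × List (String × Option Int)) :=
  (pvScatterPass
      (pvScatterPass (pvScatterPass PySem.Dict.empty "common" listing_hashes_per_app_id_for_common)
        "uncommon" listing_hashes_per_app_id_for_uncommon)
      "rare" listing_hashes_per_app_id_for_rare).items.map
    (fun p => (p.1, p.2.items))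

-- ===== PRECONDITION & SPEC =====
-- Pre_ excludes association lists carrying a duplicate key inside one dict argument: a Python dict cannot
-- contain duplicate keys, and which occurrence wins is an artefact of the list representation.
def Pre_enumerate_item_rarity_patterns (listing_hashes_per_app_id_for_common : List (String × Int)) (listing_hashes_per_app_id_for_uncommon : List (String × Int)) (listing_hashes_per_app_id_for_rare : List (String × Int)) : Prop :=
  (listing_hashes_per_app_id_for_common.map Prod.fst).Nodup ∧
  (listing_hashes_per_app_id_for_uncommon.map Prod.fst).Nodup ∧
  (listing_hashes_per_app_id_for_rare.map Prod.fst).Nodup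
instance (listing_hashes_per_app_id_for_common : List (String × Int)) (listing_hashes_per_app_id_for_uncommon : List (String × Int)) (listing_hashes_per_app_id_for_rare : List (String × Int)) : Decidable (Pre_enumerate_item_rarity_patterns listing_hashes_per_app_id_for_common listing_hashes_per_app_id_for_uncommon listing_hashes_per_app_id_for_rare) := by unfold Pre_enumerate_item_rarity_patterns; infer_instance

def pvWitness_enumerate_item_rarity_patterns : (List (String × Int)) × (List (String × Int)) × (List (String × Int)) :=
  ([("10", 3)], [("10", 4), ("20", 1)], [("20", 2)])

def Spec_enumerate_item_rarity_patterns (listing_hashes_per_app_id_for_common : List (String × Int)) (listing_hashes_per_app_id_for_uncommon : List (String × Int)) (listing_hashes_per_app_id_for_rare : List (String × Int)) (out : List (String × List (String × Option Int))) : Prop := out = enumerate_item_rarity_patterns_alt listing_hashes_per_app_id_for_common listing_hashes_per_app_id_for_uncommon listing_hashes_per_app_id_for_rare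
instance (listing_hashes_per_app_id_for_common : List (String × Int)) (listing_hashes_per_app_id_for_uncommon : List (String × Int)) (listing_hashes_per_app_id_for_rare : List (String × Int)) (out : List (String × List (String × Option Int))) : Decidable (Spec_enumerate_item_rarity_patterns listing_hashes_per_app_id_for_common listing_hashes_per_app_id_for_uncommon listing_hashes_per_app_id_for_rare out) := by unfold Spec_enumerate_item_rarity_patterns; infer_instance

-- ===== CLAIM (what is proved, stated in full; the proofs are below) =====
def Claim_equal_enumerate_item_rarity_patterns : Prop := ∀ (listing_hashes_per_app_id_for_common : List (String × Int)) (listing_hashes_per_app_id_for_uncommon : List (String × Int)) (listing_hashes_per_app_id_for_rare : List (String × Int)), Dom_enumerate_item_rarity_patterns listing_hashes_per_app_id_for_common listing_hashes_per_app_id_for_uncommon listing_hashes_per_app_id_for_rare → Pre_enumerate_item_rarity_patterns listing_hashes_per_app_id_for_common listing_hashes_per_app_id_for_uncommon listing_hashes_per_app_id_for_rare → Spec_enumerate_item_rarity_patterns listing_hashes_per_app_id_for_common listing_hashes_per_app_id_for_uncommon listing_hashes_per_app_id_for_rare (enumerate_item_rarity_patterns listing_hashes_per_app_id_for_common listing_hashes_per_app_id_for_uncommon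 listing_hashes_per_app_id_for_rare)

-- ===== LEMMAS AND PROOFS =====

-- a key that does not occur in the source is untouched by a scatter pass
lemma getD_pvScatterPass_not_mem (source : List (String × Int)) (acc : PySem.Dict String (PySem.Dict String (Option Int))) (label k : String) (hk : k ∉ source.map Prod.fst) :
    (pvScatterPass acc label source).getD k pvSeedEntry = acc.getD k pvSeedEntry := by
  induction source generalizing acc with
  | nil => rfl
  | cons p t ih =>
    simp only [List.map_cons, List.mem_cons, not_or] at hk
    rw [show pvScatterPass acc label (p :: t)
          = pvScatterPass (acc.insert p.1 ((acc.getD p.1 pvSeedEntry).insert label (some p.2))) label t from rfl,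
        ih _ hk.2, PySem.Dict.getD_insert_of_ne _ _ _ hk.1]

-- what one scatter pass does to the entry of a key, for a duplicate-free source
lemma getD_pvScatterPass (source : List (String × Int)) (acc : PySem.Dict String (PySem.Dict String (Option Int))) (label k : String) (hnd : (source.map Prod.fst).Nodup) :
    (pvScatterPass acc label source).getD k pvSeedEntry =
      match (PySem.Dict.mk source).get? k with
      | some v => (acc.getD k pvSeedEntry).insert label (some v)
      | none => acc.getD k pvSeedEntry := by
  induction source generalizing acc with
  | nil => rfl
  | cons p t ih =>
    simp only [List.map_cons, List.nodup_cons] at hnd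
    rw [show pvScatterPass acc label (p :: t)
          = pvScatterPass (acc.insert p.1 ((acc.getD p.1 pvSeedEntry).insert label (some p.2))) label t from rfl,
        PySem.Dict.get?_mk_cons]
    by_cases h : p.1 = k
    · subst h
      simp only [beq_self_eq_true, if_true]
      rw [getD_pvScatterPass_not_mem _ _ _ _ hnd.1, PySem.Dict.getD_insert_self]
    · have hb : (p.1 == k) = false := beq_eq_false_iff_ne.mpr h
      simp only [hb, Bool.false_eq_true, if_false]
      rw [ih _ hnd.2]
      simp only [PySem.Dict.getD_insert_of_ne _ _ _ (Ne.symm h)]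

-- keys of a scatter pass
lemma keys_pvScatterPass (source : List (String × Int)) (acc : PySem.Dict String (PySem.Dict String (Option Int))) (label : String) :
    (pvScatterPass acc label source).keys = PySem.Set.update acc.keys (source.map Prod.fst) :=
  PySem.Dict.keys_foldl_insert_key source Prod.fst _ acc

-- ===== VERDICT (by name: the statement is the Claim_ definition above) =====
theorem enumerate_item_rarity_patterns_spec : Claim_equal_enumerate_item_rarity_patterns := by
  intro c u r _ hpre
  obtain ⟨hc, hu, hr⟩ := hpre
  unfold Spec_enumerate_item_rarity_patterns
  have hall : PySem.Set.union (PySem.Set.union (PySem.Set.ofList (c.map Prod.fst)) (u.map Prod.fst)) (r.map Prod.fst)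
      = PySem.Set.ofList (c.map Prod.fst ++ u.map Prod.fst ++ r.map Prod.fst) := by
    simp [PySem.Set.union, PySem.Set.update, PySem.Set.ofList, List.foldl_append]
  have hkeys : (pvScatterPass (pvScatterPass (pvScatterPass PySem.Dict.empty "common" c) "uncommon" u) "rare" r).keys
      = PySem.Set.ofList (c.map Prod.fst ++ u.map Prod.fst ++ r.map Prod.fst) := by
    rw [keys_pvScatterPass, keys_pvScatterPass, keys_pvScatterPass]
    simp [PySem.Set.update, PySem.Set.ofList, List.foldl_append, PySem.Dict.keys, PySem.Dict.empty]
  have hnd : (pvScatterPass (pvScatterPass (pvScatterPass PySem.Dict.empty "common" c) "uncommon" u) "rare" r).keys.Nodup := by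
    rw [hkeys]; exact PySem.Set.nodup_ofList _
  -- A-side: the gather fold over the fresh distinct key-union is a map
  have hA : enumerate_item_rarity_patterns c u r
      = (PySem.Set.ofList (c.map Prod.fst ++ u.map Prod.fst ++ r.map Prod.fst)).map
          (fun k => (k, ([("common", (PySem.Dict.mk c).get? k), ("uncommon", (PySem.Dict.mk u).get? k),
            ("rare", (PySem.Dict.mk r).get? k)] : List (String × Option Int)))) := by
    show List.map (fun (p : String × PySem.Dict String (Option Int)) => (p.1, p.2.items))
        (List.foldl
          (fun (acc : PySem.Dict String (PySem.Dict String (Option Int))) (app_id : String) => acc.insert app_id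
            (((PySem.Dict.empty.insert "common" ((PySem.Dict.mk c).get? app_id)).insert
                "uncommon" ((PySem.Dict.mk u).get? app_id)).insert
              "rare" ((PySem.Dict.mk r).get? app_id)))
          PySem.Dict.empty
          (PySem.Set.union (PySem.Set.union (PySem.Set.ofList (c.map Prod.fst)) (u.map Prod.fst)) (r.map Prod.fst))).items
      = _
    rw [hall, PySem.Dict.items_foldl_insert_fresh _ (fun a => a) _ PySem.Dict.empty
          (fun a _ => PySem.Dict.contains_empty a) (by simp)]
    simp only [PySem.Dict.empty, List.nil_append, List.map_map]
    rfl
  -- B-side: the scattered dict read back through its keys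
  have hB : enumerate_item_rarity_patterns_alt c u r
      = (PySem.Set.ofList (c.map Prod.fst ++ u.map Prod.fst ++ r.map Prod.fst)).map
          (fun k => (k, ((pvScatterPass (pvScatterPass (pvScatterPass PySem.Dict.empty "common" c) "uncommon" u) "rare" r).getD k pvSeedEntry).items)) := by
    show List.map (fun (p : String × PySem.Dict String (Option Int)) => (p.1, p.2.items))
        (pvScatterPass (pvScatterPass (pvScatterPass PySem.Dict.empty "common" c) "uncommon" u) "rare" r).items = _
    rw [PySem.Dict.items_eq_map_keys _ hnd pvSeedEntry, hkeys, List.map_map]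
    rfl
  rw [hA, hB]
  apply List.map_congr_left
  intro k _
  rw [getD_pvScatterPass r _ "rare" k hr, getD_pvScatterPass u _ "uncommon" k hu,
      getD_pvScatterPass c _ "common" k hc]
  rcases hgc : (PySem.Dict.mk c).get? k with _ | vc <;>
    rcases hgu : (PySem.Dict.mk u).get? k with _ | vu <;>
      rcases hgr : (PySem.Dict.mk r).get? k with _ | vr <;>
        rfl
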